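-- pv_equiv track=rewrite | github.com/aburks/AmazonSyncForYNAB | matcher.py | getItemsCombination
-- ===== SOURCE A (Python) =====
-- def getItemsCombination(afterTaxItems):
--     if len(afterTaxItems) == 1:
--         return {afterTaxItems[0][1]: [afterTaxItems[0][0]]}
--     prevCombinations = getItemsCombination(afterTaxItems[:-1])
--     curItem = afterTaxItems[-1]
--     prices = list(prevCombinations.keys())
--     for price in prices:
--         prevCombinations[price+curItem[1]] = prevCombinations[price] + [curItem[0]]
--         prevCombinations[curItem[1]] = [curItem[0]]
--     return prevCombinations
-- ===== SOURCE B (Python) =====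
-- def getItemsCombination(afterTaxItems):
--     result = {afterTaxItems[0][1]: [afterTaxItems[0][0]]}
--     for curItem in afterTaxItems[1:]:
--         for price in list(result.keys()):
--             result[price + curItem[1]] = result[price] + [curItem[0]]
--             result[curItem[1]] = [curItem[0]]
--     return result
-- ===== Notes on version B (the rewrite author's own statement) =====
-- stated objective: simpler
-- what changed: Replaces the linear recursion on afterTaxItems[:-1] with a single left-to-right loop over afterTaxItems[1:], eliminating the per-level list slicing and the recursion depth limit.
import Mathlib
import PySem

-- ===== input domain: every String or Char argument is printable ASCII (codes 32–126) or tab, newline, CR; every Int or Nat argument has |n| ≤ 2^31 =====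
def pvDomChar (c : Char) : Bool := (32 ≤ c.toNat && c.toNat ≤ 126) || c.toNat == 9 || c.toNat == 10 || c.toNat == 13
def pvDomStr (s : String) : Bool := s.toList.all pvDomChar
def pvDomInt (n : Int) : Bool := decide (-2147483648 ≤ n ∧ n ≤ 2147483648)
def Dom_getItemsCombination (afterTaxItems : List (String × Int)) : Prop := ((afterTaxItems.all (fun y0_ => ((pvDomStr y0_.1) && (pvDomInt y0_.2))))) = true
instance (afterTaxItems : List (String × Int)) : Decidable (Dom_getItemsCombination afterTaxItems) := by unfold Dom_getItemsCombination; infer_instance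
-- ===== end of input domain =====

-- B replaces A's recursion on afterTaxItems[:-1] with one left-to-right loop over afterTaxItems[1:] (simpler, no slicing).
-- Both A and B raise on the empty list (RecursionError / IndexError); Pre_ excludes it.

-- ===== PORT A =====
-- Recursive helper = A's body, returning the Python dict; the port returns its items list
-- (type convention: dict -> association list). The `[]` case is unreachable under Pre_
-- (Python recurses forever there, RecursionError); the guard only makes the port total.
-- `prevCombinations[price]` is ported as getD with default []: exact, since `price` is
-- drawn from a snapshot of the keys and keys are never removed, so KeyError is impossible.
def pvGetItemsA : List (String × Int) → PySem.Dict Int (List String)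
  | [] => PySem.Dict.empty
  | [x] => PySem.Dict.empty.insert x.2 [x.1]    -- {afterTaxItems[0][1]: [afterTaxItems[0][0]]}
  | a :: b :: rest =>
      let prevCombinations := pvGetItemsA ((a :: b :: rest).dropLast)   -- afterTaxItems[:-1]
      let curItem := (a :: b :: rest).getLast (by simp)                 -- afterTaxItems[-1]
      let prices := prevCombinations.keys                               -- list(prevCombinations.keys())
      prices.foldl
        (fun d price =>
          (d.insert (price + curItem.2) (d.getD price [] ++ [curItem.1])).insert curItem.2 [curItem.1])
        prevCombinations
  termination_by xs => xs.length
  decreasing_by simp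

def getItemsCombination (afterTaxItems : List (String × Int)) : List (Int × List String) :=
  (pvGetItemsA afterTaxItems).items

-- ===== PORT B =====
-- one loop iteration of Source B: inner for over a snapshot of the current keys
def pvGetItemsStep (result : PySem.Dict Int (List String)) (curItem : String × Int) :
    PySem.Dict Int (List String) :=
  result.keys.foldl
    (fun r price =>
      (r.insert (price + curItem.2) (r.getD price [] ++ [curItem.1])).insert curItem.2 [curItem.1])
    result

-- Source B raises IndexError on []; the [] branch only makes the port total (excluded by Pre_)
def getItemsCombination_alt (afterTaxItems : List (String × Int)) : List (Int × List String) :=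
  match afterTaxItems with
  | [] => []
  | x :: rest => (rest.foldl pvGetItemsStep (PySem.Dict.empty.insert x.2 [x.1])).items

-- ===== PRECONDITION & SPEC =====
-- Pre_ excludes only the empty list, where Python A raises RecursionError (and B IndexError).
def Pre_getItemsCombination (afterTaxItems : List (String × Int)) : Prop := afterTaxItems ≠ []
instance (afterTaxItems : List (String × Int)) : Decidable (Pre_getItemsCombination afterTaxItems) := by unfold Pre_getItemsCombination; infer_instance
def pvWitness_getItemsCombination : (List (String × Int)) := [("a", 1), ("b", 2)]

def Spec_getItemsCombination (afterTaxItems : List (String × Int)) (out : List (Int × List String)) : Prop := out = getItemsCombination_alt afterTaxItems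
instance (afterTaxItems : List (String × Int)) (out : List (Int × List String)) : Decidable (Spec_getItemsCombination afterTaxItems out) := by unfold Spec_getItemsCombination; infer_instance

-- ===== CLAIM (what is proved, stated in full; the proofs are below) =====
def Claim_equal_getItemsCombination : Prop := ∀ (afterTaxItems : List (String × Int)), Dom_getItemsCombination afterTaxItems → Pre_getItemsCombination afterTaxItems → Spec_getItemsCombination afterTaxItems (getItemsCombination afterTaxItems)

-- ===== LEMMAS AND PROOFS =====

-- the recursion of A, started at head x, computes B's left fold over the tail
lemma pvGetItemsA_eq_foldl (x : String × Int) (ys : List (String × Int)) :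
    pvGetItemsA (x :: ys) = ys.foldl pvGetItemsStep (PySem.Dict.empty.insert x.2 [x.1]) := by
  induction ys using List.reverseRecOn with
  | nil => simp [pvGetItemsA]
  | append_singleton ys y ih =>
    cases ys with
    | nil => simp [pvGetItemsA, pvGetItemsStep]
    | cons z zs =>
      rw [show x :: ((z :: zs) ++ [y]) = x :: z :: (zs ++ [y]) by simp]
      rw [pvGetItemsA]
      rw [show (x :: z :: (zs ++ [y])).dropLast = x :: z :: zs by
            rw [show x :: z :: (zs ++ [y]) = (x :: z :: zs) ++ [y] by simp, List.dropLast_concat],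
          show (x :: z :: (zs ++ [y])).getLast (by simp) = y by simp]
      rw [ih, List.foldl_append]
      rfl

-- ===== VERDICT (by name: the statement is the Claim_ definition above) =====
theorem getItemsCombination_spec : Claim_equal_getItemsCombination := by
  intro xs _ hpre
  match xs with
  | [] => exact absurd rfl hpre
  | x :: ys =>
    show getItemsCombination (x :: ys) = getItemsCombination_alt (x :: ys)
    simp only [getItemsCombination, getItemsCombination_alt, pvGetItemsA_eq_foldl]
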